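-- pv_equiv track=rewrite | github.com/hemmatio/drmario | AssemblyArt/main.py | assemble_image
-- ===== SOURCE A (Python) =====
-- SCREEN_SIZE = (256, 256)
--
-- def RGB_to_HEX(rgb: tuple[int, ...]) -> str:
--     return f"0x{''.join(f'{x:02x}' for x in rgb)}"
--
-- def xy_offset_to_hex(x: int, y: int) -> str:
--     number = 4*((SCREEN_SIZE[1]*y) + x)
--     return f"0x{number:08x}"
--
-- def int_to_hex(number: int) -> str:
--     return f"0x{number:08x}"
--
-- def assemble_image(rgb_matrix: list[list[tuple[int, ...]]]) -> str:
--     instructions = []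
--     counter = 0
--     size = 0
--     for y, row in enumerate(rgb_matrix):
--         for x, rgb in enumerate(row):
--             # if rgb == (0, 0, 0):
--                 # continue
--             instructions.append(f"{xy_offset_to_hex(x, y)}, {RGB_to_HEX(rgb)}, ")
--             counter += 1
--             size += 1
--             if counter == 12:
--                 instructions.append("\n")
--                 counter = 0
--     instructions.insert(0, f"{int_to_hex(size)},\n")
--     return "".join(instructions)
-- ===== SOURCE B (Python) =====
-- SCREEN_SIZE = (256, 256)
--
-- def _entry(x, y, rgb):
--     return f"0x{4*(SCREEN_SIZE[1]*y + x):08x}, 0x{''.join(f'{c:02x}' for c in rgb)}, "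
--
-- def assemble_image(rgb_matrix):
--     # Flat list of formatted entries, then header, then chunk-of-12 slicing.
--     entries = [_entry(x, y, rgb)
--                for y, row in enumerate(rgb_matrix)
--                for x, rgb in enumerate(row)]
--     body = ""
--     rest = entries
--     while len(rest) >= 12:
--         body += "".join(rest[:12]) + "\n"
--         rest = rest[12:]
--     body += "".join(rest)
--     return f"0x{len(entries):08x},\n" + body
-- ===== Notes on version B (the rewrite author's own statement) =====
-- stated objective: alternative
-- what changed: A interleaves formatting with a running counter/size in one nested loop, inserting a newline every 12th append and the header afterwards; B first builds the flat list of formatted entries, derives the header from its length, and produces the body by repeatedly slicing off 12-entry chunks joined with newlines.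
import Mathlib
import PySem

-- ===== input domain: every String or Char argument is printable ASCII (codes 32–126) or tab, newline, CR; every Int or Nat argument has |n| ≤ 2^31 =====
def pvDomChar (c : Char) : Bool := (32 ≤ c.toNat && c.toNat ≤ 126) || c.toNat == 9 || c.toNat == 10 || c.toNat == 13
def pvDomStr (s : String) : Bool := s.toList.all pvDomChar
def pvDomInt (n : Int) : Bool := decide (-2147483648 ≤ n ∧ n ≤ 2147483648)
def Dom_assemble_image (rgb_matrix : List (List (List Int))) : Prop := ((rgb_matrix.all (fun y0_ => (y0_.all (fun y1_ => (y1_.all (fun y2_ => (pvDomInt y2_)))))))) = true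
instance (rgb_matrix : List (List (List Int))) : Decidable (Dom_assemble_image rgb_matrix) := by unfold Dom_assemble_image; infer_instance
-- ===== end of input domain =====

-- B replaces A's running newline counter by a flat entry list chunked into slices of 12 (objective: alternative decomposition, same cost).
-- Strings are handled as List Char and converted with String.ofList at the end; exact for "".join / f-string concatenation.

-- ===== PORT A =====
-- shared hand port of Python's hex f-string f"{n:0{w}x}": lowercase hex digits,
-- sign first for negatives, zero-padded to total width w — exact for every int.
def pyHexNat (n : Nat) : List Char :=
  if n < 16 then [Nat.digitChar n]
  else pyHexNat (n / 16) ++ [Nat.digitChar (n % 16)]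
decreasing_by exact Nat.div_lt_self (by omega) (by omega)

def pyHexPad (n : Int) (w : Nat) : List Char :=
  if n < 0 then
    let ds := pyHexNat n.natAbs
    '-' :: (List.replicate (w - 1 - ds.length) '0' ++ ds)
  else
    let ds := pyHexNat n.toNat
    List.replicate (w - ds.length) '0' ++ ds

def RGB_to_HEX (rgb : List Int) : List Char :=
  '0' :: 'x' :: rgb.flatMap (fun c => pyHexPad c 2)

def xy_offset_to_hex (x y : Int) : List Char :=
  '0' :: 'x' :: pyHexPad (4 * (256 * y + x)) 8

def int_to_hex (n : Int) : List Char :=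
  '0' :: 'x' :: pyHexPad n 8

-- the f-string f"{xy_offset_to_hex(x, y)}, {RGB_to_HEX(rgb)}, "
def entryA (x y : Int) (rgb : List Int) : List Char :=
  xy_offset_to_hex x y ++ (',' :: ' ' :: RGB_to_HEX rgb) ++ [',', ' ']

def assemble_image (rgb_matrix : List (List (List Int))) : String :=
  -- state = (instructions, counter, size); instructions.insert(0, header) on a list built
  -- from index 0 is the cons below; "".join is flatten.
  let st := (PySem.List.enumerate rgb_matrix).foldl
    (fun st yr =>
      (PySem.List.enumerate yr.2).foldl
        (fun (st2 : List (List Char) × Int × Int) xr =>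
          let instrs := st2.1 ++ [entryA xr.1 yr.1 xr.2]
          let counter := st2.2.1 + 1
          let size := st2.2.2 + 1
          if counter == 12 then (instrs ++ [['\n']], 0, size)
          else (instrs, counter, size)) st)
    (([] : List (List Char)), (0 : Int), (0 : Int))
  String.ofList (((int_to_hex st.2.2 ++ [',', '\n']) :: st.1).flatten)

-- ===== PORT B =====
-- Source B's _entry(x, y, rgb)
def entryB (x y : Int) (rgb : List Int) : List Char :=
  ('0' :: 'x' :: pyHexPad (4 * (256 * y + x)) 8) ++
    (',' :: ' ' :: '0' :: 'x' :: rgb.flatMap (fun c => pyHexPad c 2)) ++ [',', ' ']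

-- Source B's while loop: full 12-entry slices joined with "\n", the final partial slice bare
def chunksB (rest : List (List Char)) : List Char :=
  if 12 ≤ rest.length then
    (PySem.List.slice rest none (some 12)).flatten ++
      '\n' :: chunksB (PySem.List.slice rest (some 12) none)
  else rest.flatten
termination_by rest.length
decreasing_by
  rw [PySem.List.slice_from rest (by norm_num)]
  simp only [List.length_drop]; omega

def assemble_image_alt (rgb_matrix : List (List (List Int))) : String :=
  let entries := (PySem.List.enumerate rgb_matrix).flatMap
    (fun yr => (PySem.List.enumerate yr.2).map (fun xr => entryB xr.1 yr.1 xr.2))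
  String.ofList ((int_to_hex (entries.length : Int) ++ [',', '\n']) ++ chunksB entries)

-- ===== PRECONDITION & SPEC =====
def Spec_assemble_image (rgb_matrix : List (List (List Int))) (out : String) : Prop := out = assemble_image_alt rgb_matrix
instance (rgb_matrix : List (List (List Int))) (out : String) : Decidable (Spec_assemble_image rgb_matrix out) := by unfold Spec_assemble_image; infer_instance

-- ===== CLAIM (what is proved, stated in full; the proofs are below) =====
def Claim_equal_assemble_image : Prop := ∀ (rgb_matrix : List (List (List Int))), Dom_assemble_image rgb_matrix → Spec_assemble_image rgb_matrix (assemble_image rgb_matrix)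

-- ===== LEMMAS AND PROOFS =====

-- A's loop body on one entry string
def stepA (st : List (List Char) × Int × Int) (e : List Char) : List (List Char) × Int × Int :=
  if st.2.1 + 1 == 12 then (st.1 ++ [e] ++ [['\n']], 0, st.2.2 + 1)
  else (st.1 ++ [e], st.2.1 + 1, st.2.2 + 1)

def entriesOf (m : List (List (List Int))) : List (List Char) :=
  (PySem.List.enumerate m).flatMap
    (fun yr => (PySem.List.enumerate yr.2).map (fun xr => entryA xr.1 yr.1 xr.2))

-- canonical serialisation: emit entries, newline after every 12th (k = slots left in the line)
def emit : List (List Char) → Nat → List Char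
  | [], _ => []
  | e :: E, k => if k = 1 then e ++ '\n' :: emit E 12 else e ++ emit E (k - 1)

theorem entryB_eq (x y : Int) (rgb : List Int) : entryB x y rgb = entryA x y rgb := rfl

theorem foldA (E : List (List Char)) :
    ∀ (instrs : List (List Char)) (c s : Int), 0 ≤ c → c < 12 →
      (E.foldl stepA (instrs, c, s)).1.flatten
          = instrs.flatten ++ emit E (12 - c.toNat) ∧
        (E.foldl stepA (instrs, c, s)).2.2 = s + E.length := by
  induction E with
  | nil => intro instrs c s h0 h12; simp [emit]
  | cons e E ih =>
    intro instrs c s h0 h12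
    by_cases hc : c + 1 = 12
    · have hc' : c = 11 := by omega
      subst hc'
      have hstep : stepA (instrs, 11, s) e = (instrs ++ [e] ++ [['\n']], 0, s + 1) := by
        simp [stepA]
      rw [List.foldl_cons, hstep]
      obtain ⟨h1, h2⟩ := ih (instrs ++ [e] ++ [['\n']]) 0 (s + 1) (by norm_num) (by norm_num)
      refine ⟨?_, by rw [h2, List.length_cons]; push_cast; omega⟩
      rw [h1]
      simp [emit]
    · have hbeq : (c + 1 == 12) = false := by simp; omega
      have hstep : stepA (instrs, c, s) e = (instrs ++ [e], c + 1, s + 1) := by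
        simp [stepA, hbeq]
      rw [List.foldl_cons, hstep]
      obtain ⟨h1, h2⟩ := ih (instrs ++ [e]) (c + 1) (s + 1) (by omega) (by omega)
      refine ⟨?_, by rw [h2, List.length_cons]; push_cast; omega⟩
      rw [h1]
      have hk : (12 : Nat) - c.toNat ≠ 1 := by omega
      have hk' : (12 : Nat) - (c + 1).toNat = 12 - c.toNat - 1 := by omega
      simp [emit, hk, hk']

theorem emit_lt : ∀ (E : List (List Char)) (k : Nat), E.length < k → emit E k = E.flatten := by
  intro E
  induction E with
  | nil => intro k _; simp [emit]
  | cons e E ih =>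
    intro k hk
    simp only [List.length_cons] at hk
    have h1 : k ≠ 1 := by omega
    simp [emit, h1, ih (k - 1) (by omega)]

theorem emit_ge : ∀ (k : Nat) (E : List (List Char)), 1 ≤ k → k ≤ E.length →
    emit E k = (E.take k).flatten ++ '\n' :: emit (E.drop k) 12 := by
  intro k
  induction k with
  | zero => intro E h1 _; omega
  | succ k ih =>
    intro E _ hlen
    match E with
    | [] => simp at hlen
    | e :: E =>
      by_cases hk : k = 0
      · subst hk; simp [emit]
      · have : k + 1 ≠ 1 := by omega
        simp only [emit, if_neg this, Nat.add_sub_cancel]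
        rw [ih E (by omega) (by simpa using hlen)]
        simp [List.take_succ_cons]

theorem chunksB_eq (E : List (List Char)) : chunksB E = emit E 12 := by
  generalize hn : E.length = n
  induction n using Nat.strong_induction_on generalizing E with
  | _ n ih =>
    rw [chunksB]
    by_cases h : 12 ≤ E.length
    · rw [if_pos h, PySem.List.slice_from E (by norm_num),
        PySem.List.slice_to E (by norm_num)]
      have hd : (E.drop (12 : Int).toNat).length < n := by
        simp only [List.length_drop]; omega
      rw [ih _ hd _ rfl, emit_ge 12 E (by norm_num) h]
      rfl
    · rw [if_neg h, emit_lt E 12 (by omega)]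

theorem nested_eq (m : List (List (List Int))) :
    ((PySem.List.enumerate m).foldl
      (fun st yr =>
        (PySem.List.enumerate yr.2).foldl
          (fun (st2 : List (List Char) × Int × Int) xr =>
            let instrs := st2.1 ++ [entryA xr.1 yr.1 xr.2]
            let counter := st2.2.1 + 1
            let size := st2.2.2 + 1
            if counter == 12 then (instrs ++ [['\n']], 0, size)
            else (instrs, counter, size)) st)
      (([] : List (List Char)), (0 : Int), (0 : Int)))
      = (entriesOf m).foldl stepA ([], 0, 0) := by
  rw [entriesOf, List.foldl_flatMap]
  congr 1
  funext st yr
  rw [List.foldl_map]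
  rfl

-- ===== VERDICT (by name: the statement is the Claim_ definition above) =====
theorem assemble_image_spec : Claim_equal_assemble_image := by
  intro m _
  unfold Spec_assemble_image assemble_image assemble_image_alt
  simp only [entryB_eq]
  rw [show ((PySem.List.enumerate m).flatMap
      (fun yr => (PySem.List.enumerate yr.2).map (fun xr => entryA xr.1 yr.1 xr.2)))
      = entriesOf m from rfl]
  rw [nested_eq m, chunksB_eq]
  obtain ⟨h1, h2⟩ := foldA (entriesOf m) [] 0 0 (by norm_num) (by norm_num)
  have h1' : (List.foldl stepA ([], 0, 0) (entriesOf m)).1.flatten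
      = emit (entriesOf m) 12 := by simpa using h1
  have h2' : (List.foldl stepA ([], 0, 0) (entriesOf m)).2.2
      = ((entriesOf m).length : Int) := by simpa using h2
  rw [List.flatten_cons, h1', h2', List.append_assoc]
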